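-- pv_equiv track=rewrite | github.com/pdhuddy/daily-python-challenges | daily_python_4-16.py | oddOneOut
-- ===== SOURCE A (Python) =====
-- def oddOneOut(arr):
-- 	if arr[0]%2 != arr[1]%2:
-- 		if arr[1]%2 == arr[2]%2:
-- 			return arr[0]
-- 		else:
-- 			return arr[1]
--
-- 	oddOrEven = arr[0]%2
-- 	i = 1
-- 	while arr[i]%2 == oddOrEven:
-- 		i += 1
--
-- 	return arr[i]
-- ===== SOURCE B (Python) =====
-- def oddOneOut(arr):
-- 	evens = [x for x in arr if x % 2 == 0]
-- 	odds = [x for x in arr if x % 2 == 1]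
-- 	return evens[0] if arr[0] % 2 + arr[1] % 2 + arr[2] % 2 >= 2 else odds[0]
-- ===== Notes on version B (the rewrite author's own statement) =====
-- stated objective: alternative
-- what changed: B partitions the whole array into an evens list and an odds list in two comprehensions and selects the head of the minority list by an arithmetic vote (sum of the first three parities >= 2), replacing A's branch triangle over the first three elements and its index-based while scan with a second parity variable.
import Mathlib
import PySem

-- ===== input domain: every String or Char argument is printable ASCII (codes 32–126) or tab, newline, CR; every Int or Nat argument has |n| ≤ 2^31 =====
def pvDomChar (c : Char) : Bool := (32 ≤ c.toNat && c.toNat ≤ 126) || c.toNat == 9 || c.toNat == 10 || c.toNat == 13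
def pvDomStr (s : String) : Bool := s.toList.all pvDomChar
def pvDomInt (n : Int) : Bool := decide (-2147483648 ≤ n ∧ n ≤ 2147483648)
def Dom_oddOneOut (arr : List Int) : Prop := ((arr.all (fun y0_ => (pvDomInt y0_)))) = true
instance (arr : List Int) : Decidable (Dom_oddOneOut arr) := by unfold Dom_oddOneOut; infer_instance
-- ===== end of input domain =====

-- B partitions the array into evens and odds and picks the head of the minority list by an
-- arithmetic parity vote over the first three elements; equivalence is on the return value only.

-- ===== PORT A =====
-- A's while loop 'while arr[i]%2 == oddOrEven: i += 1; return arr[i]'; the out-of-range case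
-- (Python IndexError, excluded by Pre_) returns 0.
def oddLoopA (arr : List Int) (oddOrEven : Int) (i : Nat) : Int :=
  if h : i < arr.length then
    if PySem.Int.mod arr[i] 2 = oddOrEven then oddLoopA arr oddOrEven (i + 1) else arr[i]
  else 0
termination_by arr.length - i

def oddOneOut (arr : List Int) : Int :=
  -- arr[0], arr[1], arr[2]; indices out of range raise in Python (excluded by Pre_), here getD 0
  let a0 := arr.getD 0 0
  let a1 := arr.getD 1 0
  let a2 := arr.getD 2 0
  if PySem.Int.mod a0 2 ≠ PySem.Int.mod a1 2 then
    if PySem.Int.mod a1 2 = PySem.Int.mod a2 2 then a0 else a1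
  else
    oddLoopA arr (PySem.Int.mod a0 2) 1

-- ===== PORT B =====
def oddOneOut_alt (arr : List Int) : Int :=
  let evens := arr.filter (fun x => PySem.Int.mod x 2 = 0)
  let odds := arr.filter (fun x => PySem.Int.mod x 2 = 1)
  -- evens[0] / odds[0] on an empty list raise in Python (excluded by Pre_), here getD 0
  if PySem.Int.mod (arr.getD 0 0) 2 + PySem.Int.mod (arr.getD 1 0) 2 + PySem.Int.mod (arr.getD 2 0) 2 ≥ 2
  then evens.getD 0 0 else odds.getD 0 0

-- ===== PRECONDITION & SPEC =====
-- Pre_ excludes exactly the inputs where A raises IndexError: fewer than three elements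
-- (arr[0..2] are read), or all elements sharing arr[0]'s parity so the scan runs off the end.
def Pre_oddOneOut (arr : List Int) : Prop :=
  3 ≤ arr.length ∧
    (PySem.Int.mod (arr.getD 0 0) 2 = PySem.Int.mod (arr.getD 1 0) 2 →
      ∃ x ∈ arr, PySem.Int.mod x 2 ≠ PySem.Int.mod (arr.getD 0 0) 2)
instance (arr : List Int) : Decidable (Pre_oddOneOut arr) := by unfold Pre_oddOneOut; infer_instance

def pvWitness_oddOneOut : List Int := [2, 4, 5]

def Spec_oddOneOut (arr : List Int) (out : Int) : Prop := out = oddOneOut_alt arr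
instance (arr : List Int) (out : Int) : Decidable (Spec_oddOneOut arr out) := by unfold Spec_oddOneOut; infer_instance

-- ===== CLAIM (what is proved, stated in full; the proofs are below) =====
def Claim_equal_oddOneOut : Prop := ∀ (arr : List Int), Dom_oddOneOut arr → Pre_oddOneOut arr → Spec_oddOneOut arr (oddOneOut arr)

-- ===== LEMMAS AND PROOFS =====

-- Python's '% 2' is Lean's emod for the positive divisor 2.
theorem pymod2 (x : Int) : PySem.Int.mod x 2 = x % 2 :=
  PySem.Int.mod_eq_emod_of_pos (by norm_num)

-- The two parity filters B builds are each other's complements.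
theorem filter_ne_zero (l : List Int) :
    l.filter (fun x => !decide (x % 2 = 0)) = l.filter (fun x => decide (x % 2 = 1)) :=
  List.filter_congr (fun x _ => by rcases Int.emod_two_eq x with h | h <;> simp [h])

theorem filter_ne_one (l : List Int) :
    l.filter (fun x => !decide (x % 2 = 1)) = l.filter (fun x => decide (x % 2 = 0)) :=
  List.filter_congr (fun x _ => by rcases Int.emod_two_eq x with h | h <;> simp [h])

-- A's index scan from position i returns the first element past i whose parity differs from ref,
-- i.e. the head of the (≠ ref)-parity filter of the suffix (0 in both out-of-range cases).
theorem oddLoopA_eq_filter (arr : List Int) (ref : Int) (i : Nat) :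
    oddLoopA arr ref i = ((arr.drop i).filter (fun x => !decide (x % 2 = ref))).getD 0 0 := by
  fun_induction oddLoopA arr ref i with
  | case1 i h hm ih =>
      rw [pymod2] at hm
      rw [List.drop_eq_getElem_cons h, ih, List.filter_cons]
      simp [hm]
  | case2 i h hm =>
      rw [pymod2] at hm
      rw [List.drop_eq_getElem_cons h, List.filter_cons]
      simp [hm]
  | case3 i h =>
      rw [List.drop_eq_nil_of_le (by omega)]
      rfl

theorem oddOneOut_eq (arr : List Int) (hpre : Pre_oddOneOut arr) :
    oddOneOut arr = oddOneOut_alt arr := by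
  obtain ⟨hlen, hex⟩ := hpre
  match arr, hlen, hex with
  | a :: b :: c :: t, _, hex =>
    simp only [List.getD, List.getElem?_cons_zero, List.getElem?_cons_succ,
      Option.getD_some, pymod2] at hex
    simp only [oddOneOut, oddOneOut_alt, List.getD, List.getElem?_cons_zero,
      List.getElem?_cons_succ, Option.getD_some, pymod2]
    by_cases h01 : a % 2 = b % 2
    · -- same first two parities: A scans from index 1; B's vote picks a's parity as ref
      rw [if_neg (fun hn => hn h01), oddLoopA_eq_filter, List.drop_succ_cons, List.drop_zero]
      by_cases ha : a % 2 = 0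
      · -- ref even: the vote stays below 2, B reads odds; a is even, its filter skips a
        rw [if_neg (by omega), ha, filter_ne_zero]
        have hskip : (a :: b :: c :: t).filter (fun x => decide (x % 2 = 1))
            = (b :: c :: t).filter (fun x => decide (x % 2 = 1)) := by
          rw [List.filter_cons, if_neg (by simp; omega)]
        rw [hskip, List.getD_eq_getElem?_getD]
      · -- ref odd: the vote reaches 2, B reads evens; a is odd, its filter skips a
        have ha1 : a % 2 = 1 := by omega
        rw [if_pos (by omega), ha1, filter_ne_one]
        have hskip : (a :: b :: c :: t).filter (fun x => decide (x % 2 = 0))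
            = (b :: c :: t).filter (fun x => decide (x % 2 = 0)) := by
          rw [List.filter_cons, if_neg (by simp [ha])]
        rw [hskip, List.getD_eq_getElem?_getD]
    · -- differing first two parities: A returns a or b from the branch triangle
      rw [if_pos h01]
      by_cases h12 : b % 2 = c % 2
      · -- a is the minority element; it heads its own parity filter
        rw [if_pos h12]
        by_cases ha : a % 2 = 0
        · rw [if_pos (by omega), List.filter_cons, if_pos (by simp [ha])]
          rfl
        · rw [if_neg (by omega), List.filter_cons, if_pos (by simp; omega)]
          rfl
      · -- b is the minority element; a has the other parity, so b heads b's parity filter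
        rw [if_neg h12]
        by_cases ha : a % 2 = 0
        · -- a even, b odd, c even: vote < 2, B reads odds whose head is b
          rw [if_neg (by omega), List.filter_cons, if_neg (by simp [ha]),
            List.filter_cons, if_pos (by simp; omega)]
          rfl
        · -- a odd, b even, c odd: vote ≥ 2, B reads evens whose head is b
          rw [if_pos (by omega), List.filter_cons, if_neg (by simp [ha]),
            List.filter_cons, if_pos (by simp; omega)]
          rfl

-- ===== VERDICT (by name: the statement is the Claim_ definition above) =====
theorem oddOneOut_spec : Claim_equal_oddOneOut := by
  intro arr _ hpre
  exact oddOneOut_eq arr hpre
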